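-- pv_equiv track=rewrite | github.com/pypi-data/pypi-mirror-401 | packages/devcovenant/devcovenant-0.2.5.tar.gz/devcovenant-0.2.5/devcovenant/core/policy_scripts/changelog_coverage.py | _latest_section
-- ===== SOURCE A (Python) =====
-- def _find_markers(content: str) -> tuple[int | None, list[int]]:
--     """Return the log-marker position and version header positions."""
--
--     log_index = None
--     version_positions: list[int] = []
--     in_fence = False
--     offset = 0
--     for line in content.splitlines(keepends=True):
--         stripped = line.strip()
--         if stripped.startswith("```"):
--             in_fence = not in_fence
--         if not in_fence:
--             if stripped.startswith("## Log changes here"):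
--                 log_index = offset
--             if stripped.startswith("## Version"):
--                 version_positions.append(offset)
--         offset += len(line)
--     return log_index, version_positions
--
-- def _latest_section(content: str) -> str:
--     """Return the newest version section from a changelog."""
--
--     log_index, version_positions = _find_markers(content)
--     if not version_positions:
--         return content
--     start = None
--     if log_index is not None:
--         for pos in version_positions:
--             if pos >= log_index:
--                 start = pos
--                 break
--     if start is None:
--         start = version_positions[0]
--     next_start = None
--     for pos in version_positions:
--         if pos > start:
--             next_start = pos
--             break
--     if next_start is None:
--         return content[start:]
--     return content[start:next_start]
-- ===== SOURCE B (Python) =====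
-- def _latest_section(content: str) -> str:
--     """Return the newest version section from a changelog (single streaming pass)."""
--     in_fence = False
--     offset = 0
--     first = second = None
--     seen_log = False
--     start = end = None
--     for line in content.splitlines(keepends=True):
--         stripped = line.strip()
--         if stripped.startswith("```"):
--             in_fence = not in_fence
--         if not in_fence:
--             if stripped.startswith("## Log changes here"):
--                 seen_log = True
--                 start = None
--                 end = None
--             if stripped.startswith("## Version"):
--                 if first is None:
--                     first = offset
--                 elif second is None:
--                     second = offset
--                 if seen_log and start is None:
--                     start = offset
--                 elif start is not None and end is None:
--                     end = offset
--         offset += len(line)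
--     if first is None:
--         return content
--     if start is None:
--         start, end = first, second
--     return content[start:end]
-- ===== Notes on version B (the rewrite author's own statement) =====
-- stated objective: alternative
-- what changed: Replaced the marker-collecting pass (_find_markers building a full list of version offsets) plus three subsequent linear searches over that list by a single streaming pass that tracks the first/second version offsets and the current section start/end directly, resetting them at each log marker; no position list is ever built.
import Mathlib
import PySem

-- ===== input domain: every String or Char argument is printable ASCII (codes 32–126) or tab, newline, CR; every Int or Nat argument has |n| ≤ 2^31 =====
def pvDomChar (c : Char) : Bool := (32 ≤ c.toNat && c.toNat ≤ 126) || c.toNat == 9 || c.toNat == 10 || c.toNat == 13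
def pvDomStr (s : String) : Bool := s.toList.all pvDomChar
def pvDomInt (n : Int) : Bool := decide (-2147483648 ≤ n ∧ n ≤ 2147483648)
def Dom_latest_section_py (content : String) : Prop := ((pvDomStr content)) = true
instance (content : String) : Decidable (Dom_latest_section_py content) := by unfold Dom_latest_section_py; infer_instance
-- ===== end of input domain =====

-- B replaces A's marker-collecting pass plus three linear searches by a single
-- streaming pass that keeps the needed offsets directly (objective: alternative decomposition).

-- shared primitive: content.splitlines(keepends=True); exact on the Dom alphabet
-- (tab/LF/CR + printable ASCII — Python's extra line breaks \v \f \x1c-\x1e \x85 … lie outside Dom)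
def pySplitKeep (acc : List Char) : List Char → List (List Char)
  | [] => if acc = [] then [] else [acc.reverse]
  | '\r' :: '\n' :: rest => (acc.reverse ++ ['\r', '\n']) :: pySplitKeep [] rest
  | '\r' :: rest => (acc.reverse ++ ['\r']) :: pySplitKeep [] rest
  | '\n' :: rest => (acc.reverse ++ ['\n']) :: pySplitKeep [] rest
  | c :: rest => pySplitKeep (c :: acc) rest

-- ===== PORT A =====
-- the for-loop of _find_markers
def fm_loop : List (List Char) → Bool → Int → Option Int → List Int → (Option Int × List Int)
  | [], _, _, log, vers => (log, vers)
  | line :: rest, fence, off, log, vers =>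
    let stripped := PySem.Chars.strip line
    let fence' := if PySem.Chars.startswith stripped "```".toList then !fence else fence
    let log' := if !fence' && PySem.Chars.startswith stripped "## Log changes here".toList then some off else log
    let vers' := if !fence' && PySem.Chars.startswith stripped "## Version".toList then vers ++ [off] else vers
    fm_loop rest fence' (off + (line.length : Int)) log' vers'

-- 'for pos in version_positions: if pos >= log_index: start = pos; break'
def firstGE : List Int → Int → Option Int
  | [], _ => none
  | p :: rest, l => if p ≥ l then some p else firstGE rest l

-- 'for pos in version_positions: if pos > start: next_start = pos; break'
def firstGT : List Int → Int → Option Int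
  | [], _ => none
  | p :: rest, s => if p > s then some p else firstGT rest s

def latest_section_py (content : String) : String :=
  let r := fm_loop (pySplitKeep [] content.toList) false 0 none []
  match r.2 with
  | [] => content
  | v0 :: _ =>
    let start0 : Option Int := match r.1 with | some l => firstGE r.2 l | none => none
    let start := start0.getD v0
    match firstGT r.2 start with
    | none => PySem.Str.slice content (some start) none
    | some nxt => PySem.Str.slice content (some start) (some nxt)

-- ===== PORT B =====
-- one streaming pass: first/second version offsets, log-seen flag, start/end of the section
def sc_loop : List (List Char) → Bool → Int → Option Int → Option Int → Bool → Option Int → Option Int →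
    (Option Int × Option Int × Bool × Option Int × Option Int)
  | [], _, _, fst, snd, sl, st, en => (fst, snd, sl, st, en)
  | line :: rest, fence, off, fst, snd, sl, st, en =>
    let stripped := PySem.Chars.strip line
    let fence' := if PySem.Chars.startswith stripped "```".toList then !fence else fence
    if fence' then sc_loop rest fence' (off + (line.length : Int)) fst snd sl st en
    else
      let isLog := PySem.Chars.startswith stripped "## Log changes here".toList
      let sl' := sl || isLog
      let st1 := if isLog then none else st
      let en1 := if isLog then none else en
      if PySem.Chars.startswith stripped "## Version".toList then
        let fst' := if fst.isNone then some off else fst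
        let snd' := if fst.isSome && snd.isNone then some off else snd
        let st' := if sl' && st1.isNone then some off else st1
        let en' := if !(sl' && st1.isNone) && st1.isSome && en1.isNone then some off else en1
        sc_loop rest fence' (off + (line.length : Int)) fst' snd' sl' st' en'
      else
        sc_loop rest fence' (off + (line.length : Int)) fst snd sl' st1 en1

def latest_section_py_alt (content : String) : String :=
  let r := sc_loop (pySplitKeep [] content.toList) false 0 none none false none none
  match r.1 with
  | none => content
  | some f =>
    let se : Int × Option Int := match r.2.2.2.1 with
      | some s => (s, r.2.2.2.2)
      | none => (f, r.2.1)
    PySem.Str.slice content (some se.1) se.2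

-- ===== PRECONDITION & SPEC =====
def Spec_latest_section_py (content : String) (out : String) : Prop := out = latest_section_py_alt content
instance (content : String) (out : String) : Decidable (Spec_latest_section_py content out) := by unfold Spec_latest_section_py; infer_instance

-- ===== CLAIM (what is proved, stated in full; the proofs are below) =====
def Claim_equal_latest_section_py : Prop := ∀ (content : String), Dom_latest_section_py content → Spec_latest_section_py content (latest_section_py content)

-- ===== LEMMAS AND PROOFS =====

def stOf (log : Option Int) (vers : List Int) : Option Int := log.bind (fun l => firstGE vers l)
def enOf (log : Option Int) (vers : List Int) : Option Int := (stOf log vers).bind (fun s => firstGT vers s)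

lemma firstGE_none (vers : List Int) (l : Int) (h : ∀ v ∈ vers, v < l) : firstGE vers l = none := by
  induction vers with
  | nil => rfl
  | cons p rest ih =>
    have hp := h p (by simp)
    simp only [firstGE, if_neg (by omega : ¬ p ≥ l)]
    exact ih (fun v hv => h v (by simp [hv]))

lemma firstGT_none (vers : List Int) (s : Int) (h : ∀ v ∈ vers, v ≤ s) : firstGT vers s = none := by
  induction vers with
  | nil => rfl
  | cons p rest ih =>
    have hp := h p (by simp)
    simp only [firstGT, if_neg (by omega : ¬ p > s)]
    exact ih (fun v hv => h v (by simp [hv]))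

lemma firstGE_append (vers : List Int) (p l : Int) :
    firstGE (vers ++ [p]) l =
      (match firstGE vers l with
       | some s => some s
       | none => if p ≥ l then some p else none) := by
  induction vers with
  | nil => simp [firstGE]
  | cons q rest ih =>
    by_cases h : q ≥ l <;> simp [firstGE, h, ih]

lemma firstGT_append (vers : List Int) (p s : Int) :
    firstGT (vers ++ [p]) s =
      (match firstGT vers s with
       | some e => some e
       | none => if p > s then some p else none) := by
  induction vers with
  | nil => simp [firstGT]
  | cons q rest ih =>
    by_cases h : q > s <;> simp [firstGT, h, ih]

lemma firstGE_mem (vers : List Int) (l s : Int) (h : firstGE vers l = some s) : s ∈ vers := by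
  induction vers with
  | nil => simp [firstGE] at h
  | cons p rest ih =>
    by_cases hp : p ≥ l
    · simp [firstGE, hp] at h; simp [h]
    · simp only [firstGE, if_neg hp] at h; simp [ih h]

lemma firstGT_cons_self (v0 : Int) (rest : List Int) (h : ∀ v ∈ rest, v0 < v) :
    firstGT (v0 :: rest) v0 = rest[0]? := by
  cases rest with
  | nil => simp [firstGT]
  | cons r t =>
    have := h r (by simp)
    simp [firstGT, if_neg (by omega : ¬ v0 > v0), this]

lemma not_both_prefix (s : List Char)
    (h1 : PySem.Chars.startswith s "## Log changes here".toList = true)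
    (h2 : PySem.Chars.startswith s "## Version".toList = true) : False := by
  rw [PySem.Chars.startswith_iff] at h1 h2
  have h3 : "## Version".toList <+: "## Log changes here".toList :=
    List.prefix_of_prefix_length_le h2 h1 (by decide)
  exact absurd h3 (by decide)

lemma startswith_ne_nil (s p : List Char) (h : PySem.Chars.startswith s p = true) (hp : p ≠ []) :
    s ≠ [] := by
  rw [PySem.Chars.startswith_iff] at h
  intro hs
  subst hs
  exact hp (List.prefix_nil.mp h)

lemma line_len_pos (line : List Char) (p : List Char)
    (h : PySem.Chars.startswith (PySem.Chars.strip line) p = true) (hp : p ≠ []) :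
    (1 : Int) ≤ (line.length : Int) := by
  have hs : PySem.Chars.strip line ≠ [] := startswith_ne_nil _ _ h hp
  have hl : line ≠ [] := by
    intro hnil; subst hnil; exact hs (by decide)
  have := List.length_pos_iff.mpr hl
  omega

lemma loop_rel (lines : List (List Char)) :
    ∀ (fence : Bool) (off : Int) (log : Option Int) (vers : List Int),
    (∀ v ∈ vers, v < off) → (∀ l, log = some l → l < off) → vers.Pairwise (· < ·) →
    (sc_loop lines fence off vers[0]? vers[1]? log.isSome (stOf log vers) (enOf log vers)
      = ((fm_loop lines fence off log vers).2[0]?, (fm_loop lines fence off log vers).2[1]?,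
         (fm_loop lines fence off log vers).1.isSome,
         stOf (fm_loop lines fence off log vers).1 (fm_loop lines fence off log vers).2,
         enOf (fm_loop lines fence off log vers).1 (fm_loop lines fence off log vers).2))
    ∧ (fm_loop lines fence off log vers).2.Pairwise (· < ·) := by
  induction lines with
  | nil =>
    intro fence off log vers hv hl hp
    exact ⟨rfl, hp⟩
  | cons line rest ih =>
    intro fence off log vers hv hl hp
    simp only [sc_loop, fm_loop]
    have hlen0 : (0 : Int) ≤ (line.length : Int) := by positivity
    cases hf : (if PySem.Chars.startswith (PySem.Chars.strip line) "```".toList then !fence else fence) with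
    | true =>
      simp only [if_true, Bool.not_true, Bool.false_and, if_neg (by simp : ¬ (false = true)), Bool.false_eq_true]
      exact ih true (off + (line.length : Int)) log vers
        (fun v hvv => by have := hv v hvv; omega)
        (fun l hll => by have := hl l hll; omega) hp
    | false =>
      by_cases hLog : PySem.Chars.startswith (PySem.Chars.strip line) "## Log changes here".toList = true
      · have hVer : PySem.Chars.startswith (PySem.Chars.strip line) "## Version".toList = false := by
          cases h : PySem.Chars.startswith (PySem.Chars.strip line) "## Version".toList
          · rfl
          · exact absurd (not_both_prefix _ hLog h) (fun x => x)
        have hlen1 : (1 : Int) ≤ (line.length : Int) := line_len_pos _ _ hLog (by decide)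
        simp only [hLog, hVer, Bool.not_false, Bool.true_and, if_true, if_false,
          Bool.or_true, Bool.false_eq_true, Option.isSome_some]
        have hst : stOf (some off) vers = none := by
          simp [stOf, firstGE_none vers off hv]
        have hen : enOf (some off) vers = none := by simp [enOf, hst]
        have H := ih false (off + (line.length : Int)) (some off) vers
          (fun v hvv => by have := hv v hvv; omega)
          (fun l hll => by injection hll with h2; omega) hp
        rw [hst, hen] at H
        simpa using H
      · by_cases hVer : PySem.Chars.startswith (PySem.Chars.strip line) "## Version".toList = true
        · have hlen1 : (1 : Int) ≤ (line.length : Int) := line_len_pos _ _ hVer (by decide)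
          simp only [hLog, hVer, Bool.not_false, Bool.true_and, if_true, if_false,
            Bool.or_false, Bool.false_eq_true]
          have hv' : ∀ v ∈ vers ++ [off], v < off + (line.length : Int) := by
            intro v hvv
            rcases List.mem_append.mp hvv with h | h
            · have := hv v h; omega
            · simp at h; omega
          have hp' : (vers ++ [off]).Pairwise (· < ·) := by
            rw [List.pairwise_append]
            exact ⟨hp, by simp, by intro a ha b hb; simp at hb; subst hb; exact hv a ha⟩
          have hl' : ∀ l, log = some l → l < off + (line.length : Int) := by
            intro l hll; have := hl l hll; omega
          have e1 : (if (vers[0]?).isNone then some off else vers[0]?) = (vers ++ [off])[0]? := by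
            cases vers <;> simp
          have e2 : (if (vers[0]?).isSome && (vers[1]?).isNone then some off else vers[1]?)
              = (vers ++ [off])[1]? := by
            cases vers with
            | nil => simp
            | cons v t => cases t <;> simp
          have e3 : (if log.isSome && (stOf log vers).isNone then some off else stOf log vers)
              = stOf log (vers ++ [off]) := by
            cases log with
            | none => simp [stOf]
            | some l =>
              have hlo : l < off := hl l rfl
              simp only [stOf, Option.bind_some] at *
              rw [firstGE_append]
              cases hge : firstGE vers l with
              | none => simp [hge, if_pos (by omega : off ≥ l)]
              | some s => simp [hge]
          have e4 : (if !(log.isSome && (stOf log vers).isNone) && (stOf log vers).isSome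
                        && (enOf log vers).isNone then some off else enOf log vers)
              = enOf log (vers ++ [off]) := by
            cases log with
            | none => simp [stOf, enOf]
            | some l =>
              have hlo : l < off := hl l rfl
              simp only [stOf, enOf, Option.bind_some] at *
              cases hge : firstGE vers l with
              | none =>
                rw [firstGE_append]
                simp only [hge, if_pos (by omega : off ≥ l), Option.bind_some]
                rw [firstGT_append]
                have : firstGT vers off = none :=
                  firstGT_none vers off (fun v hvv => le_of_lt (hv v hvv))
                simp [this, if_neg (by omega : ¬ off > off)]
              | some s =>
                have hs : s < off := hv s (firstGE_mem vers l s hge)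
                rw [firstGE_append]
                simp only [hge, Option.bind_some]
                rw [firstGT_append]
                cases hgt : firstGT vers s with
                | none => simp [hgt, hge, if_pos (by omega : off > s)]
                | some e => simp [hgt, hge]
          rw [e1, e2, e3, e4]
          exact ih false (off + (line.length : Int)) log (vers ++ [off]) hv' hl' hp'
        · simp only [hLog, hVer, Bool.not_false, Bool.true_and, if_false,
            Bool.or_false, Bool.false_eq_true]
          exact ih false (off + (line.length : Int)) log vers
            (fun v hvv => by have := hv v hvv; omega)
            (fun l hll => by have := hl l hll; omega) hp

theorem latest_section_py_spec : Claim_equal_latest_section_py := by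
  unfold Claim_equal_latest_section_py
  intro content _
  unfold Spec_latest_section_py
  obtain ⟨H, hp⟩ := loop_rel (pySplitKeep [] content.toList) false 0 none []
    (by simp) (by intro l h; cases h) (by simp)
  simp only [List.getElem?_nil, Option.isSome_none,
    show stOf none [] = none from rfl, show enOf none [] = none from rfl] at H
  simp only [latest_section_py, latest_section_py_alt]
  rw [H]
  generalize hq : fm_loop (pySplitKeep [] content.toList) false 0 none [] = q at hp ⊢
  obtain ⟨lg, vs⟩ := q
  cases vs with
  | nil => simp [stOf, enOf]
  | cons v0 t =>
    have hlt : ∀ v ∈ t, v0 < v := (List.pairwise_cons.mp hp).1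
    have hnext := firstGT_cons_self v0 t hlt
    cases lg with
    | none =>
      simp only [stOf, enOf, Option.bind_none, Option.isSome_none]
      simp [hnext]
      cases t <;> simp
    | some l =>
      cases hge : firstGE (v0 :: t) l with
      | none =>
        simp only [stOf, enOf, Option.bind_some, hge, Option.bind_none]
        simp [hnext]
        cases t <;> simp
      | some s =>
        simp only [stOf, enOf, Option.bind_some, hge]
        simp
        cases firstGT (v0 :: t) s <;> simp
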